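-- pv_equiv track=rewrite | github.com/juliank1m/vlr-scraper | scrape_player_stats.py | group_games_by_match
-- ===== SOURCE A (Python) =====
-- from collections import defaultdict
--
-- def group_games_by_match(game_rows: list[dict[str, str]]) -> dict[str, list[dict[str, str]]]:
--     grouped_rows: dict[str, list[dict[str, str]]] = defaultdict(list)
--     seen_game_keys: set[tuple[str, str]] = set()
--
--     for row in game_rows:
--         match_id = row.get("match_id")
--         game_id = row.get("game_id")
--         if not match_id or not game_id:
--             continue
--
--         key = (match_id, game_id)
--         if key in seen_game_keys:
--             continue
--
--         seen_game_keys.add(key)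
--         grouped_rows[match_id].append(row)
--
--     return dict(grouped_rows)
-- ===== SOURCE B (Python) =====
-- def group_games_by_match(game_rows: list[dict[str, str]]) -> dict[str, list[dict[str, str]]]:
--     # Pass 1: dedup by (match_id, game_id), keeping the first row per key, in order.
--     unique: dict[tuple[str, str], dict[str, str]] = {}
--     for row in game_rows:
--         match_id = row.get("match_id")
--         game_id = row.get("game_id")
--         if not match_id or not game_id:
--             continue
--         key = (match_id, game_id)
--         if key not in unique:
--             unique[key] = row
--     # Pass 2: group the surviving rows by match_id, in order.
--     grouped: dict[str, list[dict[str, str]]] = {}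
--     for row in unique.values():
--         match_id = row["match_id"]  # present: pass 1 only kept rows with it
--         if match_id in grouped:
--             grouped[match_id].append(row)
--         else:
--             grouped[match_id] = [row]
--     return grouped
-- ===== Notes on version B (the rewrite author's own statement) =====
-- stated objective: alternative
-- what changed: Splits A's single fused dedup+group loop (seen-key set + defaultdict append) into two passes: first an ordered dict keyed by (match_id, game_id) keeping the first row per key, then a separate grouping pass over its values into a plain dict; Pre_ only excludes association-list rows with a duplicated key, which do not arise from A's dict[str, str] rows.
import Mathlib
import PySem

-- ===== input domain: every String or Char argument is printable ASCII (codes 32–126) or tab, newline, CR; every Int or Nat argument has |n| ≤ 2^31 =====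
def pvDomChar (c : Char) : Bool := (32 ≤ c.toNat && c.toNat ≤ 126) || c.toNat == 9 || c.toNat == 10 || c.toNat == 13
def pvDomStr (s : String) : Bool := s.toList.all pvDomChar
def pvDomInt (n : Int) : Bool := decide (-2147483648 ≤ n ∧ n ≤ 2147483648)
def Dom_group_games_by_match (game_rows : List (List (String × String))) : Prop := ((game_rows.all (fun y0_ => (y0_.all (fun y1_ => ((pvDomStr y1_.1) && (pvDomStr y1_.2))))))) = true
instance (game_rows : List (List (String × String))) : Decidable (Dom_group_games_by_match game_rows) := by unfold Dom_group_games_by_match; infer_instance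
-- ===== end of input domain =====

-- B replaces A's fused dedup+group loop (seen-key set + defaultdict append) by two passes:
-- an ordered dedup table keyed by (match_id, game_id), then a separate grouping pass over its
-- values; same return value (alternative decomposition, not claimed faster).

-- shared field reads: match_id = row.get("match_id"), game_id = row.get("game_id");
-- "" stands for Python's falsy None/"" (the guard treats both alike)
def ggmMatchId (row : List (String × String)) : String :=
  ((PySem.Dict.mk row).get? "match_id").getD ""
def ggmGameId (row : List (String × String)) : String :=
  ((PySem.Dict.mk row).get? "game_id").getD ""

-- ===== PORT A =====
-- loop body of A's single for-loop (state: grouped_rows dict, seen_game_keys set)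
def ggmStepA (st : PySem.Dict String (List (List (String × String))) × PySem.Set (String × String))
    (row : List (String × String)) :
    PySem.Dict String (List (List (String × String))) × PySem.Set (String × String) :=
  if ggmMatchId row = "" ∨ ggmGameId row = "" then st     -- if not match_id or not game_id: continue
  else if st.2.contains (ggmMatchId row, ggmGameId row) then st   -- if key in seen_game_keys: continue
  else (st.1.modify (ggmMatchId row) [] (· ++ [row]),     -- grouped_rows[match_id].append(row)  (defaultdict)
        st.2.add (ggmMatchId row, ggmGameId row))         -- seen_game_keys.add(key)

def group_games_by_match (game_rows : List (List (String × String))) :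
    List (String × List (List (String × String))) :=
  (game_rows.foldl ggmStepA
    ((PySem.Dict.empty : PySem.Dict String (List (List (String × String)))),
     (PySem.Set.empty : PySem.Set (String × String)))).1.items   -- return dict(grouped_rows)

-- ===== PORT B =====
-- pass 1 loop body: ordered dedup table keyed by (match_id, game_id), first row wins
def ggmStep1 (u : PySem.Dict (String × String) (List (String × String)))
    (row : List (String × String)) : PySem.Dict (String × String) (List (String × String)) :=
  if ggmMatchId row = "" ∨ ggmGameId row = "" then u      -- if not match_id or not game_id: continue
  else if u.contains (ggmMatchId row, ggmGameId row) then u   -- if key not in unique: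
  else u.insert (ggmMatchId row, ggmGameId row) row       --   unique[key] = row

-- pass 2 loop body: group a surviving row into a plain dict by its match_id
-- (row["match_id"] is present for every row pass 1 kept, so ggmMatchId reads exactly that value)
def ggmStep2 (d : PySem.Dict String (List (List (String × String))))
    (row : List (String × String)) : PySem.Dict String (List (List (String × String))) :=
  if d.contains (ggmMatchId row) then
    d.insert (ggmMatchId row) (d.getD (ggmMatchId row) [] ++ [row])   -- grouped[match_id].append(row)
  else d.insert (ggmMatchId row) [row]                                -- grouped[match_id] = [row]

def group_games_by_match_alt (game_rows : List (List (String × String))) :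
    List (String × List (List (String × String))) :=
  let unique := game_rows.foldl ggmStep1
    (PySem.Dict.empty : PySem.Dict (String × String) (List (String × String)))
  (unique.values.foldl ggmStep2
    (PySem.Dict.empty : PySem.Dict String (List (List (String × String))))).items

-- ===== PRECONDITION & SPEC =====
-- Pre_ excludes only inputs with a row whose association list repeats a key: such a row
-- does not arise from a Python dict[str, str] (A's actual argument type), so nothing is
-- claimed there. Every genuine dict row satisfies Pre_.
def Pre_group_games_by_match (game_rows : List (List (String × String))) : Prop :=
  ∀ row ∈ game_rows, (row.map Prod.fst).Nodup
-- e.g. the row [("match_id", "m1"), ("game_id", "g1"), ("match_id", "x")] repeats "match_id" and is excluded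
instance (game_rows : List (List (String × String))) : Decidable (Pre_group_games_by_match game_rows) := by unfold Pre_group_games_by_match; infer_instance

def pvWitness_group_games_by_match : (List (List (String × String))) :=
  [[("match_id", "m1"), ("game_id", "g1"), ("player", "p")],
   [("match_id", "m1"), ("game_id", "g1"), ("player", "q")],
   [("match_id", "m1"), ("game_id", "g2")],
   [("match_id", "m2"), ("game_id", "g1")]]

def Spec_group_games_by_match (game_rows : List (List (String × String))) (out : List (String × List (List (String × String)))) : Prop := out = group_games_by_match_alt game_rows
instance (game_rows : List (List (String × String))) (out : List (String × List (List (String × String)))) : Decidable (Spec_group_games_by_match game_rows out) := by unfold Spec_group_games_by_match; infer_instance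

-- ===== CLAIM (what is proved, stated in full; the proofs are below) =====
def Claim_equal_group_games_by_match : Prop := ∀ (game_rows : List (List (String × String))), Dom_group_games_by_match game_rows → Pre_group_games_by_match game_rows → Spec_group_games_by_match game_rows (group_games_by_match game_rows)

-- ===== LEMMAS AND PROOFS =====

-- B's grouping step is exactly A's defaultdict-append step
theorem ggmStep2_eq_modify (d : PySem.Dict String (List (List (String × String))))
    (row : List (String × String)) :
    ggmStep2 d row = d.modify (ggmMatchId row) [] (· ++ [row]) := by
  unfold ggmStep2
  simp only [PySem.Dict.modify]
  split_ifs with h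
  · rfl
  · rw [PySem.Dict.getD_of_not_contains _ _ (by simpa using h), List.nil_append]

-- set membership after add, in the shape Dict.contains_insert produces
theorem ggmSet_contains_add (s : PySem.Set (String × String)) (x y : String × String) :
    (PySem.Set.add s x).contains y = (y == x || s.contains y) := by
  have hbeq : (y == x) = decide (y = x) := by
    by_cases hxy : y = x <;> simp [hxy]
  unfold PySem.Set.add
  split_ifs with h
  · by_cases hxy : y = x
    · subst hxy; rw [h]; simp
    · rw [hbeq]; simp [hxy]
  · rw [hbeq]
    simp [Bool.or_comm]

-- pass 1 only ever appends fresh items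
theorem ggmFold1_items (rows : List (List (String × String)))
    (u : PySem.Dict (String × String) (List (String × String))) :
    ∃ ext, (rows.foldl ggmStep1 u).items = u.items ++ ext := by
  induction rows generalizing u with
  | nil => exact ⟨[], by simp⟩
  | cons row rest ih =>
    simp only [List.foldl_cons]
    by_cases h1 : ggmMatchId row = "" ∨ ggmGameId row = ""
    · rw [show ggmStep1 u row = u by simp [ggmStep1, h1]]
      exact ih u
    by_cases h2 : u.contains (ggmMatchId row, ggmGameId row) = true
    · rw [show ggmStep1 u row = u by simp [ggmStep1, h1, h2]]
      exact ih u
    · rw [show ggmStep1 u row = u.insert (ggmMatchId row, ggmGameId row) row by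
        simp [ggmStep1, h1, h2]]
      obtain ⟨ext, hext⟩ := ih (u.insert (ggmMatchId row, ggmGameId row) row)
      refine ⟨[((ggmMatchId row, ggmGameId row), row)] ++ ext, ?_⟩
      rw [hext, PySem.Dict.items_insert_of_not_contains _ _ (by simpa using h2),
        List.append_assoc]

-- main invariant: A's fused loop from (g, seen) equals grouping pass 1's NEW rows onto g
theorem ggmMain (rows : List (List (String × String)))
    (g : PySem.Dict String (List (List (String × String))))
    (seen : PySem.Set (String × String))
    (u : PySem.Dict (String × String) (List (String × String)))
    (H : ∀ k, seen.contains k = u.contains k) :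
    (rows.foldl ggmStepA (g, seen)).1 =
      ((rows.foldl ggmStep1 u).values.drop u.items.length).foldl ggmStep2 g := by
  induction rows generalizing g seen u with
  | nil =>
    simp only [List.foldl_nil, PySem.Dict.values]
    rw [List.drop_eq_nil_of_le (by simp)]
    rfl
  | cons row rest ih =>
    simp only [List.foldl_cons]
    by_cases h1 : ggmMatchId row = "" ∨ ggmGameId row = ""
    · rw [show ggmStepA (g, seen) row = (g, seen) by simp [ggmStepA, h1],
        show ggmStep1 u row = u by simp [ggmStep1, h1]]
      exact ih g seen u H
    by_cases h2 : u.contains (ggmMatchId row, ggmGameId row) = true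
    · have hs : seen.contains (ggmMatchId row, ggmGameId row) = true := by rw [H]; exact h2
      have hm : (ggmMatchId row, ggmGameId row) ∈ seen := (PySem.Set.contains_iff _ _).mp hs
      rw [show ggmStepA (g, seen) row = (g, seen) by simp [ggmStepA, h1, hm],
        show ggmStep1 u row = u by simp [ggmStep1, h1, h2]]
      exact ih g seen u H
    · have hs : seen.contains (ggmMatchId row, ggmGameId row) = false := by
        rw [H]; simpa using h2
      have hm : (ggmMatchId row, ggmGameId row) ∉ seen := fun hmem => by
        rw [(PySem.Set.contains_iff _ _).mpr hmem] at hs; simp at hs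
      rw [show ggmStepA (g, seen) row =
          (g.modify (ggmMatchId row) [] (· ++ [row]),
           seen.add (ggmMatchId row, ggmGameId row)) by simp [ggmStepA, h1, hm],
        show ggmStep1 u row = u.insert (ggmMatchId row, ggmGameId row) row by
          simp [ggmStep1, h1, h2]]
      have H' : ∀ k, (seen.add (ggmMatchId row, ggmGameId row)).contains k =
          (u.insert (ggmMatchId row, ggmGameId row) row).contains k := by
        intro k
        rw [ggmSet_contains_add, PySem.Dict.contains_insert, H]
      rw [ih _ _ _ H']
      have hu' : (u.insert (ggmMatchId row, ggmGameId row) row).items =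
          u.items ++ [((ggmMatchId row, ggmGameId row), row)] :=
        PySem.Dict.items_insert_of_not_contains _ _ (by simpa using h2)
      obtain ⟨ext, hext⟩ :=
        ggmFold1_items rest (u.insert (ggmMatchId row, ggmGameId row) row)
      rw [hu', List.append_assoc] at hext
      simp only [PySem.Dict.values, hext, hu', List.length_append, List.length_cons,
        List.length_nil, Nat.zero_add, List.map_append, List.map_cons, List.singleton_append]
      rw [show u.items.length + 1 = (u.items.map (fun p => p.2)).length + 1 by simp]
      rw [show List.drop ((u.items.map (fun p => p.2)).length + 1)
            (u.items.map (fun p => p.2) ++ row :: ext.map (fun p => p.2)) =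
          ext.map (fun p => p.2) from by
        rw [show u.items.map (fun p => p.2) ++ row :: ext.map (fun p => p.2) =
            (u.items.map (fun p => p.2) ++ [row]) ++ ext.map (fun p => p.2) by simp,
          show (u.items.map (fun p => p.2)).length + 1 =
            (u.items.map (fun p => p.2) ++ [row]).length by simp, List.drop_left]]
      rw [show List.drop u.items.length
            (List.map (fun x => x.2) u.items ++ row :: List.map (fun x => x.2) ext) =
          row :: List.map (fun x => x.2) ext from by
        rw [show u.items.length =
            (List.map (fun x : (String × String) × List (String × String) => x.2) u.items).length
          by simp]
        exact List.drop_left]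
      rw [List.foldl_cons, ggmStep2_eq_modify]

-- ===== VERDICT (by name: the statement is the Claim_ definition above) =====
theorem group_games_by_match_spec : Claim_equal_group_games_by_match := by
  intro rows _ _
  unfold Spec_group_games_by_match group_games_by_match group_games_by_match_alt
  rw [ggmMain rows _ _ PySem.Dict.empty (fun k => rfl)]
  simp [PySem.Dict.empty]
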